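-- pv_equiv track=rewrite | github.com/johankfar/mehadrin-veille | veille_storage.py | _stem_fr
-- ===== SOURCE A (Python) =====
-- def _stem_fr(word):
--     """Stemming francais minimal : coupe les suffixes courants.
--     'grecques'->'grec', 'israeliens'->'israel', 'avocats'->'avocat', etc.
--     Plus besoin de lister chaque pluriel/feminin/adjectif manuellement.
--     """
--     # Ordre important : suffixes longs d'abord
--     for suffix in ("iennes", "ienne", "iens", "ien", "aises", "aise", "ais",
--                    "aines", "aine", "ains", "ain", "oles", "ole",
--                    "ques", "que", "ans", "anes", "ane",
--                    "ines", "ine", "ins", "in",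
--                    "ois", "oise", "oises",
--                    "iens", "ien", "ieres", "iere",
--                    "es", "s"):
--         if len(word) > len(suffix) + 2 and word.endswith(suffix):
--             return word[:-len(suffix)]
--     return word
-- ===== SOURCE B (Python) =====
-- def _stem_fr(word):
--     """Stemming francais minimal : coupe les suffixes courants.
--
--     Longest-match formulation: scan an (order-irrelevant) set of suffixes
--     and cut the longest one that applies; any two suffixes of the same
--     word are nested, so this equals the original first-match scan.
--     """
--     best = None
--     for suffix in ("ain", "aine", "aines", "ains", "ais", "aise", "aises",
--                    "ane", "anes", "ans", "es", "ien", "ienne", "iennes",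
--                    "iens", "iere", "ieres", "in", "ine", "ines", "ins",
--                    "ois", "oise", "oises", "ole", "oles", "que", "ques", "s"):
--         if word.endswith(suffix) and len(word) > len(suffix) + 2:
--             if best is None or len(suffix) > len(best):
--                 best = suffix
--     if best is None:
--         return word
--     return word[:-len(best)]
-- ===== Notes on version B (the rewrite author's own statement) =====
-- stated objective: alternative
-- what changed: B replaces A's ordered first-match early-return scan with an order-irrelevant longest-match pass: it folds over a deduplicated suffix set keeping the longest applicable suffix and cuts it at the end; equivalent because any two suffixes matching the same word are nested and A's order already puts no shorter nested suffix first.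
import Mathlib
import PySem

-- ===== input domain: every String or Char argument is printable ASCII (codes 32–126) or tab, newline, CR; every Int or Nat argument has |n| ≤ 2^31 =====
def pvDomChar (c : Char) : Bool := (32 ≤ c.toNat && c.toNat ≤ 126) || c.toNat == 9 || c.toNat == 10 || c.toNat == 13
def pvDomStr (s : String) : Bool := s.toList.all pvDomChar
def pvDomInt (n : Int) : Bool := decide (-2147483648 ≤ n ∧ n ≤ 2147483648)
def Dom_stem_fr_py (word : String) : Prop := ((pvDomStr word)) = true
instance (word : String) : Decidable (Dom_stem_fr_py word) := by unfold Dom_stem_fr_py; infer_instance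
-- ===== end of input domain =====

-- B replaces A's ordered first-match early-return scan by an order-irrelevant
-- longest-match fold over a deduplicated suffix set (objective: alternative).

-- ===== PORT A =====
-- A's suffix tuple, in A's order (duplicates kept)
def stemSuffixesA : List String :=
  ["iennes", "ienne", "iens", "ien", "aises", "aise", "ais",
   "aines", "aine", "ains", "ain", "oles", "ole",
   "ques", "que", "ans", "anes", "ane",
   "ines", "ine", "ins", "in",
   "ois", "oise", "oises",
   "iens", "ien", "ieres", "iere",
   "es", "s"]

-- the for-loop with early return, step for step
def stemALoop (word : String) : List String → String
  | [] => word
  | s :: rest =>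
      if PySem.Str.len word > PySem.Str.len s + 2 ∧ PySem.Str.endswith word s = true then
        PySem.Str.slice word none (some (-(PySem.Str.len s)))
      else stemALoop word rest

def stem_fr_py (word : String) : String := stemALoop word stemSuffixesA

-- ===== PORT B =====
-- B's suffix set (deduplicated, alphabetical; order irrelevant)
def stemSuffixesB : List String :=
  ["ain", "aine", "aines", "ains", "ais", "aise", "aises",
   "ane", "anes", "ans", "es", "ien", "ienne", "iennes",
   "iens", "iere", "ieres", "in", "ine", "ines", "ins",
   "ois", "oise", "oises", "ole", "oles", "que", "ques", "s"]

-- one step of B's loop: keep the longest applicable suffix seen so far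
def stemBStep (word : String) (best : Option String) (s : String) : Option String :=
  if PySem.Str.endswith word s = true ∧ PySem.Str.len word > PySem.Str.len s + 2 then
    match best with
    | none => some s
    | some b => if PySem.Str.len s > PySem.Str.len b then some s else some b
  else best

def stem_fr_py_alt (word : String) : String :=
  match stemSuffixesB.foldl (stemBStep word) none with
  | none => word
  | some b => PySem.Str.slice word none (some (-(PySem.Str.len b)))

-- ===== PRECONDITION & SPEC =====
def Spec_stem_fr_py (word : String) (out : String) : Prop := out = stem_fr_py_alt word
instance (word : String) (out : String) : Decidable (Spec_stem_fr_py word out) := by unfold Spec_stem_fr_py; infer_instance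

-- ===== CLAIM (what is proved, stated in full; the proofs are below) =====
def Claim_equal_stem_fr_py : Prop := ∀ (word : String), Dom_stem_fr_py word → Spec_stem_fr_py word (stem_fr_py word)

-- ===== LEMMAS AND PROOFS =====

-- "suffix applies": s is a suffix of word and word is more than 2 chars longer
def Mstr (word s : String) : Prop :=
  s.toList <:+ word.toList ∧ s.length + 2 < word.length

lemma guardA_iff (word s : String) :
    (PySem.Str.len word > PySem.Str.len s + 2 ∧ PySem.Str.endswith word s = true) ↔ Mstr word s := by
  simp only [Mstr, PySem.Str.len_eq, PySem.Str.endswith_eq, PySem.Chars.endswith_iff]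
  constructor
  · rintro ⟨h1, h2⟩; exact ⟨h2, by exact_mod_cast h1⟩
  · rintro ⟨h1, h2⟩; exact ⟨by exact_mod_cast h2, h1⟩

lemma guardB_iff (word s : String) :
    (PySem.Str.endswith word s = true ∧ PySem.Str.len word > PySem.Str.len s + 2) ↔ Mstr word s := by
  rw [and_comm]; exact guardA_iff word s

lemma strLen_lt_iff (u v : String) :
    PySem.Str.len u > PySem.Str.len v ↔ v.length < u.length := by
  simp only [PySem.Str.len_eq, gt_iff_lt, Nat.cast_lt, String.length_toList]

lemma M_le_suffix {w x y : String} (hx : Mstr w x) (hy : Mstr w y)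
    (h : x.length ≤ y.length) : x.toList <:+ y.toList :=
  List.suffix_of_suffix_length_le hx.1 hy.1 (by simpa using h)

lemma M_eq {w x y : String} (hx : Mstr w x) (hy : Mstr w y)
    (h : x.length = y.length) : x = y := by
  have hs := M_le_suffix hx hy (le_of_eq h)
  have : x.toList = y.toList := List.IsSuffix.eq_of_length hs (by simpa using h)
  exact String.toList_injective this

-- A's loop: either nothing applies and the word is returned, or the first
-- applicable suffix is cut and (thanks to the pairwise property) it is longest.
lemma stemALoop_spec (word : String) (L : List String)
    (hpw : L.Pairwise (fun x y => ¬(x.toList <:+ y.toList ∧ x.length < y.length))) :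
    ((∀ s ∈ L, ¬ Mstr word s) ∧ stemALoop word L = word) ∨
    (∃ s ∈ L, Mstr word s ∧ (∀ t ∈ L, Mstr word t → t.length ≤ s.length) ∧
      stemALoop word L = PySem.Str.slice word none (some (-(PySem.Str.len s)))) := by
  induction L with
  | nil => exact Or.inl ⟨by simp, rfl⟩
  | cons s rest ih =>
    rcases List.pairwise_cons.mp hpw with ⟨hhead, htail⟩
    by_cases hg : Mstr word s
    · right
      refine ⟨s, List.mem_cons_self, hg, ?_, ?_⟩
      · intro t ht hMt
        rcases List.mem_cons.mp ht with rfl | ht'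
        · exact le_rfl
        · by_contra hlt
          push Not at hlt
          exact hhead t ht' ⟨M_le_suffix hg hMt (le_of_lt hlt), hlt⟩
      · simp only [stemALoop]
        rw [if_pos ((guardA_iff word s).mpr hg)]
    · have hng : ¬ (PySem.Str.len word > PySem.Str.len s + 2 ∧ PySem.Str.endswith word s = true) := by
        rw [guardA_iff]; exact hg
      have hunfold : stemALoop word (s :: rest) = stemALoop word rest := by
        simp only [stemALoop]; rw [if_neg hng]
      rcases ih htail with ⟨hno, heq⟩ | ⟨t, ht, hMt, hmax, heq⟩
      · left
        refine ⟨?_, by rw [hunfold, heq]⟩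
        intro u hu
        rcases List.mem_cons.mp hu with rfl | hu'
        · exact hg
        · exact hno u hu'
      · right
        refine ⟨t, List.mem_cons_of_mem _ ht, hMt, ?_, by rw [hunfold, heq]⟩
        intro u hu hMu
        rcases List.mem_cons.mp hu with rfl | hu'
        · exact absurd hMu hg
        · exact hmax u hu' hMu

-- B's fold: the accumulator tracks a longest applicable suffix seen so far.
lemma foldB_spec (word : String) (L : List String) : ∀ (acc : Option String),
    (L.foldl (stemBStep word) acc = none → acc = none ∧ ∀ s ∈ L, ¬ Mstr word s) ∧
    (∀ b, L.foldl (stemBStep word) acc = some b →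
      (acc = some b ∨ (b ∈ L ∧ Mstr word b)) ∧
      (∀ s ∈ L, Mstr word s → s.length ≤ b.length) ∧
      (∀ a, acc = some a → a.length ≤ b.length)) := by
  induction L with
  | nil =>
    intro acc
    refine ⟨fun h => ⟨h, by simp⟩, fun b hb => ⟨Or.inl hb, by simp, ?_⟩⟩
    intro a ha; rw [ha] at hb; cases hb; exact le_rfl
  | cons s rest ih =>
    intro acc
    simp only [List.foldl_cons]
    by_cases hg : Mstr word s
    · have hgb : (PySem.Str.endswith word s = true ∧ PySem.Str.len word > PySem.Str.len s + 2) :=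
        (guardB_iff word s).mpr hg
      -- after the guarded step the accumulator is some suffix of length ≥ both
      obtain ⟨c, hstep, hcs, hacc_le, hc_orig⟩ :
          ∃ c, stemBStep word acc s = some c ∧ s.length ≤ c.length ∧
            (∀ a, acc = some a → a.length ≤ c.length) ∧ (c = s ∨ acc = some c) := by
        cases acc with
        | none =>
          refine ⟨s, ?_, le_rfl, by simp, Or.inl rfl⟩
          simp only [stemBStep]; rw [if_pos hgb]
        | some a =>
          by_cases hcmp : PySem.Str.len s > PySem.Str.len a
          · refine ⟨s, ?_, le_rfl, ?_, Or.inl rfl⟩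
            · simp only [stemBStep]; rw [if_pos hgb, if_pos hcmp]
            · intro a' ha'; injection ha' with h; subst h
              exact le_of_lt ((strLen_lt_iff s a).mp hcmp)
          · refine ⟨a, ?_, ?_, ?_, Or.inr rfl⟩
            · simp only [stemBStep]; rw [if_pos hgb, if_neg hcmp]
            · have := (strLen_lt_iff s a).not.mp hcmp; omega
            · intro a' ha'; cases ha'; exact le_rfl
      rw [hstep]
      constructor
      · intro h
        exact absurd ((ih (some c)).1 h).1 (by simp)
      · intro b hb
        obtain ⟨horig, hmax, hge⟩ := (ih (some c)).2 b hb
        have hcb : c.length ≤ b.length := hge c rfl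
        refine ⟨?_, ?_, ?_⟩
        · rcases horig with h | h
          · cases h
            rcases hc_orig with rfl | h'
            · exact Or.inr ⟨List.mem_cons_self, hg⟩
            · exact Or.inl h'
          · exact Or.inr ⟨List.mem_cons_of_mem _ h.1, h.2⟩
        · intro u hu hMu
          rcases List.mem_cons.mp hu with rfl | hu'
          · exact le_trans hcs hcb
          · exact hmax u hu' hMu
        · intro a ha; exact le_trans (hacc_le a ha) hcb
    · have hgb : ¬ (PySem.Str.endswith word s = true ∧ PySem.Str.len word > PySem.Str.len s + 2) := by
        rw [guardB_iff]; exact hg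
      have hstep : stemBStep word acc s = acc := by
        simp only [stemBStep]; rw [if_neg hgb]
      rw [hstep]
      constructor
      · intro h
        obtain ⟨h1, h2⟩ := (ih acc).1 h
        refine ⟨h1, ?_⟩
        intro u hu
        rcases List.mem_cons.mp hu with rfl | hu'
        · exact hg
        · exact h2 u hu'
      · intro b hb
        obtain ⟨horig, hmax, hge⟩ := (ih acc).2 b hb
        refine ⟨?_, ?_, hge⟩
        · rcases horig with h | h
          · exact Or.inl h
          · exact Or.inr ⟨List.mem_cons_of_mem _ h.1, h.2⟩
        · intro u hu hMu
          rcases List.mem_cons.mp hu with rfl | hu'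
          · exact absurd hMu hg
          · exact hmax u hu' hMu

-- the two suffix lists carry the same strings
lemma mem_suffixes_iff (s : String) : s ∈ stemSuffixesA ↔ s ∈ stemSuffixesB := by
  constructor <;> intro h <;> (fin_cases h <;> decide)

-- A's list never places a strictly shorter nested suffix before a longer one
lemma pairwiseA : stemSuffixesA.Pairwise
    (fun x y => ¬(x.toList <:+ y.toList ∧ x.length < y.length)) := by
  decide

-- ===== VERDICT (by name: the statement is the Claim_ definition above) =====
theorem stem_fr_py_spec : Claim_equal_stem_fr_py := by
  intro word _
  unfold Spec_stem_fr_py stem_fr_py stem_fr_py_alt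
  have hB := foldB_spec word stemSuffixesB none
  rcases stemALoop_spec word stemSuffixesA pairwiseA with ⟨hno, heq⟩ | ⟨s, hs, hM, hmax, heq⟩
  · rw [heq]
    cases hfold : stemSuffixesB.foldl (stemBStep word) none with
    | none => rfl
    | some b =>
      obtain ⟨horig, _, _⟩ := hB.2 b hfold
      rcases horig with h | h
      · cases h
      · exact absurd h.2 (hno b ((mem_suffixes_iff b).mpr h.1))
  · rw [heq]
    cases hfold : stemSuffixesB.foldl (stemBStep word) none with
    | none =>
      obtain ⟨_, h2⟩ := hB.1 hfold
      exact absurd hM (h2 s ((mem_suffixes_iff s).mp hs))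
    | some b =>
      obtain ⟨horig, hmaxB, _⟩ := hB.2 b hfold
      rcases horig with h | h
      · cases h
      have hMb : Mstr word b := h.2
      have h1 : b.length ≤ s.length := hmax b ((mem_suffixes_iff b).mpr h.1) hMb
      have h2 : s.length ≤ b.length := hmaxB s ((mem_suffixes_iff s).mp hs) hM
      rw [M_eq hM hMb (le_antisymm h2 h1)]
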